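-- pv_equiv track=rewrite | github.com/Judongsung/algorithm | 백준/Gold/34031. 하이터치☆메모리/하이터치☆메모리.py | count_hightouch
-- ===== SOURCE A (Python) =====
-- from collections import Counter
--
-- def count_hightouch(left: list, right: list) -> int:
--     if left[0] == ')':
--         return 0
--     count = 0
--     l_counter = Counter()
--
--     l_stack = 0
--     for ch in left:
--         if ch == '(':
--             l_stack += 1
--         else:
--             l_stack -= 1
--             if l_stack < 0:
--                 break
--         l_counter[l_stack] += 1
--
--     r_stack = 0
--     r_front = 0
--     for ch in right:
--         if ch == ')':
--             r_stack += 1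
--             r_front = max(r_stack, r_front)
--             if r_stack >= r_front:
--                 count += l_counter[r_stack]
--         else:
--             r_stack -= 1
--
--     return count
-- ===== SOURCE B (Python) =====
-- from collections import Counter
--
-- def _walk(chars, up):
--     # running balances: +1 for the `up` character, -1 otherwise
--     out, n = [], 0
--     for ch in chars:
--         n += 1 if ch == up else -1
--         out.append(n)
--     return out
--
-- def _first_reach(walk):
--     # first index at which each balance value appears
--     fr = {}
--     for i, v in enumerate(walk):
--         fr.setdefault(v, i)
--     return fr
--
-- def count_hightouch(left: list, right: list) -> int:
--     lw = _walk(left, '(')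
--     l_counter = Counter(lw[:_first_reach(lw).get(-1, len(lw))])
--     rw = _walk(right, ')')
--     fr = _first_reach(rw)
--     total = 0
--     for i, (ch, v) in enumerate(zip(right, rw)):
--         # a ')' step to depth v counts iff the walk has not reached v+1 earlier
--         if ch == ')' and v >= 0 and i <= fr.get(v + 1, i):
--             total += l_counter[v]
--     return total
-- ===== Notes on version B (the rewrite author's own statement) =====
-- stated objective: alternative
-- what changed: B replaces A's interleaved break/running-max state machine by materialised walks plus first-occurrence index dictionaries: the left histogram is cut at the first index whose balance reaches -1, and a right ')' step to depth v is counted iff the right walk has not reached v+1 at any earlier index (tested against a first-reach dict), with no running maximum, no break and no left[0] guard.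
import Mathlib
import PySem

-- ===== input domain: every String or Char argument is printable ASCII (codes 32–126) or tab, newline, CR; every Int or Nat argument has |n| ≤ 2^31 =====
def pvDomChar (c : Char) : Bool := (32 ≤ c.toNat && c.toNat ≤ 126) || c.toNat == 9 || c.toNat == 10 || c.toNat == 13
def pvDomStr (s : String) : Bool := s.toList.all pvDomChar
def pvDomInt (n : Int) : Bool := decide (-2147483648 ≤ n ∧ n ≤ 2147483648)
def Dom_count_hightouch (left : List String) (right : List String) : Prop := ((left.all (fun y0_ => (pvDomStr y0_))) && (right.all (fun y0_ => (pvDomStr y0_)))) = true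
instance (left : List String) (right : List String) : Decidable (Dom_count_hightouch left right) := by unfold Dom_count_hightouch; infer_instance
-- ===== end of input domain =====

-- B drops A's interleaved break/running-max state machine: it materialises both ±1
-- walks, records the FIRST index at which each balance value occurs in a dict, cuts
-- the left histogram at the first index reaching -1, and counts a right ')' step at
-- depth v iff the right walk has not reached v+1 at any earlier index (no running
-- maximum, no break); objective: alternative algorithm, same cost.

-- ===== PORT A =====
-- A's left loop: for ch in left: l_stack ±= 1; break if l_stack < 0; l_counter[l_stack] += 1
def aLeftLoop : List String → Int → PySem.Dict Int Int → PySem.Dict Int Int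
  | [], _, d => d
  | ch :: rest, s, d =>
    if ch = "(" then aLeftLoop rest (s + 1) (d.modify (s + 1) 0 (· + 1))
    else if s - 1 < 0 then d
    else aLeftLoop rest (s - 1) (d.modify (s - 1) 0 (· + 1))

-- A's right loop: state (r_stack, r_front, count)
def aRightLoop : List String → Int → Int → Int → PySem.Dict Int Int → Int
  | [], _, _, count, _ => count
  | ch :: rest, rs, rf, count, lc =>
    if ch = ")" then
      if rs + 1 ≥ max (rs + 1) rf then
        aRightLoop rest (rs + 1) (max (rs + 1) rf) (count + lc.getD (rs + 1) 0) lc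
      else aRightLoop rest (rs + 1) (max (rs + 1) rf) count lc
    else aRightLoop rest (rs - 1) rf count lc

def count_hightouch (left : List String) (right : List String) : Int :=
  match PySem.List.pyGet? left 0 with
  | none => 0  -- Python raises IndexError here; excluded by Pre_count_hightouch
  | some h =>
    if h = ")" then 0
    else aRightLoop right 0 0 0 (aLeftLoop left 0 PySem.Dict.empty)

-- ===== PORT B =====
-- _walk(chars, up): n += 1 if ch == up else -1; out.append(n)
def bWalk (up : String) : List String → Int → List Int
  | [], _ => []
  | ch :: rest, s =>
    (s + (if ch = up then 1 else -1)) :: bWalk up rest (s + (if ch = up then 1 else -1))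

-- _first_reach(walk): for i, v in enumerate(walk): fr.setdefault(v, i)
def bFirstReach : List (Int × Int) → PySem.Dict Int Int → PySem.Dict Int Int
  | [], fr => fr
  | (i, v) :: rest, fr => bFirstReach rest (fr.setdefault v i)

-- B's counting loop over enumerate(zip(right, rw))
def bLoop : List (Int × (String × Int)) → PySem.Dict Int Int → PySem.Dict Int Int → Int → Int
  | [], _, _, total => total
  | (i, (ch, v)) :: rest, fr, lc, total =>
    if ch = ")" ∧ 0 ≤ v ∧ i ≤ fr.getD (v + 1) i then bLoop rest fr lc (total + lc.getD v 0)
    else bLoop rest fr lc total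

def count_hightouch_alt (left : List String) (right : List String) : Int :=
  let lw := bWalk "(" left 0
  let lc := PySem.Dict.counter (PySem.List.slice lw none
      (some ((bFirstReach (PySem.List.enumerate lw 0) PySem.Dict.empty).getD (-1) (lw.length : Int))))
  let rw := bWalk ")" right 0
  let fr := bFirstReach (PySem.List.enumerate rw 0) PySem.Dict.empty
  bLoop (PySem.List.enumerate (right.zip rw) 0) fr lc 0

-- ===== PRECONDITION & SPEC =====
-- Pre_ excludes only left = [], where the Python A raises IndexError on left[0].
def Pre_count_hightouch (left : List String) (right : List String) : Prop := left ≠ []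
instance (left : List String) (right : List String) : Decidable (Pre_count_hightouch left right) := by unfold Pre_count_hightouch; infer_instance
def pvWitness_count_hightouch : List String × List String := (["(", ")"], [")", "("])

def Spec_count_hightouch (left : List String) (right : List String) (out : Int) : Prop := out = count_hightouch_alt left right
instance (left : List String) (right : List String) (out : Int) : Decidable (Spec_count_hightouch left right out) := by unfold Spec_count_hightouch; infer_instance

-- ===== CLAIM (what is proved, stated in full; the proofs are below) =====
def Claim_equal_count_hightouch : Prop := ∀ (left : List String) (right : List String), Dom_count_hightouch left right → Pre_count_hightouch left right → Spec_count_hightouch left right (count_hightouch left right)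

-- ===== LEMMAS AND PROOFS =====

theorem bWalk_cons (up ch : String) (rest : List String) (s : Int) :
    bWalk up (ch :: rest) s
      = (s + (if ch = up then 1 else -1)) :: bWalk up rest (s + (if ch = up then 1 else -1)) := rfl

theorem aLeftLoop_cons (ch : String) (rest : List String) (s : Int) (d : PySem.Dict Int Int) :
    aLeftLoop (ch :: rest) s d
      = if ch = "(" then aLeftLoop rest (s + 1) (d.modify (s + 1) 0 (· + 1))
        else if s - 1 < 0 then d
        else aLeftLoop rest (s - 1) (d.modify (s - 1) 0 (· + 1)) := rfl

theorem aRightLoop_cons (ch : String) (rest : List String) (rs rf count : Int) (lc : PySem.Dict Int Int) :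
    aRightLoop (ch :: rest) rs rf count lc
      = if ch = ")" then
          if rs + 1 ≥ max (rs + 1) rf then
            aRightLoop rest (rs + 1) (max (rs + 1) rf) (count + lc.getD (rs + 1) 0) lc
          else aRightLoop rest (rs + 1) (max (rs + 1) rf) count lc
        else aRightLoop rest (rs - 1) rf count lc := rfl

theorem bLoop_cons (i : Int) (ch : String) (v : Int) (rest : List (Int × (String × Int)))
    (fr lc : PySem.Dict Int Int) (total : Int) :
    bLoop ((i, (ch, v)) :: rest) fr lc total
      = if ch = ")" ∧ 0 ≤ v ∧ i ≤ fr.getD (v + 1) i then bLoop rest fr lc (total + lc.getD v 0)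
        else bLoop rest fr lc total := rfl

-- the first-reach dict looks up the first occurrence index
theorem bFirstReach_get? (ws : List Int) : ∀ (s : Int) (d : PySem.Dict Int Int) (x : Int),
    (bFirstReach (PySem.List.enumerate ws s) d).get? x
      = ((d.get? x).or ((PySem.List.index? ws x).map (fun k => s + (k : Int)))) := by
  induction ws with
  | nil => intro s d x; simp [PySem.List.enumerate_nil, bFirstReach]
  | cons w rest ih =>
    intro s d x
    rw [PySem.List.enumerate_cons]
    show (bFirstReach (PySem.List.enumerate rest (s + 1)) (d.setdefault w s)).get? x = _
    rw [ih (s + 1) (d.setdefault w s) x]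
    by_cases hx : x = w
    · subst hx
      rw [PySem.Dict.get?_setdefault_self, PySem.List.index?_cons_self]
      cases d.get? x <;> simp
    · rw [PySem.Dict.get?_setdefault_of_ne d s hx,
        PySem.List.index?_cons_of_ne rest (fun h => hx h.symm)]
      cases d.get? x with
      | some y => simp
      | none =>
        cases h : PySem.List.index? rest x with
        | none => simp [h]
        | some k => simp [h]; push_cast; ring

theorem firstReach_get?_empty (ws : List Int) (x : Int) :
    (bFirstReach (PySem.List.enumerate ws 0) PySem.Dict.empty).get? x
      = (PySem.List.index? ws x).map (fun k => (k : Int)) := by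
  rw [bFirstReach_get? ws 0 PySem.Dict.empty x, PySem.Dict.get?_empty]
  cases h : PySem.List.index? ws x <;> simp

-- general list fact: first index in an append when the element avoids the prefix
theorem index?_append_of_not_mem {α : Type} [BEq α] [LawfulBEq α] (pre t : List α) (x : α)
    (hx : x ∉ pre) : PySem.List.index? (pre ++ t) x = (PySem.List.index? t x).map (· + pre.length) := by
  induction pre with
  | nil => simp
  | cons p ps ih =>
    have hne : p ≠ x := fun h => hx (h ▸ List.mem_cons_self)
    rw [List.cons_append, PySem.List.index?_cons_of_ne (ps ++ t) hne,
      ih (fun h => hx (List.mem_cons_of_mem _ h))]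
    cases PySem.List.index? t x <;> simp <;> omega

-- B's per-step test reads: the walk has not reached v0+1 before the current index
theorem cond_iff (pre tail : List Int) (v0 : Int) :
    ((↑pre.length : Int) ≤ (bFirstReach (PySem.List.enumerate (pre ++ v0 :: tail) 0)
        PySem.Dict.empty).getD (v0 + 1) (↑pre.length))
      ↔ v0 + 1 ∉ pre := by
  rw [PySem.Dict.getD_eq_get?_getD, firstReach_get?_empty]
  by_cases hm : v0 + 1 ∈ pre
  · rw [PySem.List.index?_append_of_mem _ hm]
    cases hidx : PySem.List.index? pre (v0 + 1) with
    | none => exact absurd hm ((PySem.List.index?_eq_none_iff pre (v0 + 1)).mp hidx)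
    | some k =>
      obtain ⟨hk, -, -⟩ := PySem.List.getElem_of_index?_eq_some hidx
      simp only [Option.pure_def, Option.bind_eq_bind, Option.bind_some, Option.map_some,
        Option.getD_some, Nat.cast_le]
      exact ⟨fun h => absurd hk (by omega), fun h => absurd hm h⟩
  · rw [index?_append_of_not_mem pre _ _ hm,
      PySem.List.index?_cons_of_ne tail (by omega : v0 ≠ v0 + 1)]
    cases htl : PySem.List.index? tail (v0 + 1) with
    | none =>
      simp only [Option.map_none, Option.pure_def, Option.bind_eq_bind, Option.bind_none,
        Option.getD_none, Std.le_refl, true_iff]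
      exact hm
    | some k =>
      simp only [Option.map_some, Option.pure_def, Option.bind_eq_bind, Option.bind_some,
        Nat.cast_add, Nat.cast_one, Option.getD_some, le_add_iff_nonneg_left]
      exact ⟨fun _ => hm, fun _ => by positivity⟩

-- an empty histogram counts nothing
theorem bLoop_empty (l : List (Int × (String × Int))) (fr : PySem.Dict Int Int) :
    ∀ total : Int, bLoop l fr PySem.Dict.empty total = total := by
  induction l with
  | nil => intro t; rfl
  | cons p rest ih =>
    intro t
    obtain ⟨i, ch, v⟩ := p
    rw [bLoop_cons]
    split_ifs
    · rw [PySem.Dict.getD_empty, add_zero]; exact ih t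
    · exact ih t

-- A's right loop = B's first-reach scan; invariant: the processed prefix `pre` of the
-- walk contains a value w ≥ 1 iff w ≤ rf (r_front is the max of 0 and the prefix)
theorem rightLoop_eq (ws : List Int) (lc : PySem.Dict Int Int) :
    ∀ (rest : List String) (pre : List Int) (rs rf count : Int),
      ws = pre ++ bWalk ")" rest rs →
      0 ≤ rf → rs ≤ rf →
      (∀ v : Int, 0 ≤ v → (v + 1 ∈ pre ↔ v + 1 ≤ rf)) →
      aRightLoop rest rs rf count lc
        = bLoop (PySem.List.enumerate (rest.zip (bWalk ")" rest rs)) (↑pre.length))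
            (bFirstReach (PySem.List.enumerate ws 0) PySem.Dict.empty) lc count := by
  intro rest
  induction rest with
  | nil => intro pre rs rf count _ _ _ _; rfl
  | cons ch rest ih =>
    intro pre rs rf count hws h0 h1 hmem
    rw [aRightLoop_cons, bWalk_cons, List.zip_cons_cons, PySem.List.enumerate_cons, bLoop_cons]
    by_cases hch : ch = ")"
    · subst hch
      simp only [reduceIte, true_and] at hws ⊢
      have hws2 : ws = pre ++ (rs + 1) :: bWalk ")" rest (rs + 1) := by
        rw [hws, bWalk_cons]; simp only [reduceIte]
      have hws' : ws = (pre ++ [rs + 1]) ++ bWalk ")" rest (rs + 1) := by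
        rw [hws2]; simp
      have hcond := cond_iff pre (bWalk ")" rest (rs + 1)) (rs + 1)
      rw [← hws2] at hcond
      have hlen : (↑pre.length : Int) + 1 = ↑((pre ++ [rs + 1]).length) := by
        simp
      by_cases hge : rf ≤ rs + 1
      · have hc := hcond.mpr (fun hin => by
          have h2 : (0 : Int) ≤ rs + 1 := by omega
          have := (hmem (rs + 1) h2).mp hin
          omega)
        have hand : (0 : Int) ≤ rs + 1 ∧ (↑pre.length : Int) ≤
            (bFirstReach (PySem.List.enumerate ws 0) PySem.Dict.empty).getD
              (rs + 1 + 1) (↑pre.length) := ⟨by omega, hc⟩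
        rw [if_pos (by omega : rs + 1 ≥ max (rs + 1) rf), if_pos hand,
          (by omega : max (rs + 1) rf = rs + 1), hlen]
        exact ih (pre ++ [rs + 1]) (rs + 1) (rs + 1) _ hws' (by omega) (le_refl _)
          (fun v hv => by rw [List.mem_append, List.mem_singleton, hmem v hv]; omega)
      · have hc : ¬ ((0 : Int) ≤ rs + 1 ∧ (↑pre.length : Int) ≤
            (bFirstReach (PySem.List.enumerate ws 0) PySem.Dict.empty).getD
              (rs + 1 + 1) (↑pre.length)) := by
          rintro ⟨h2, hcnd⟩
          exact hcond.mp hcnd ((hmem (rs + 1) h2).mpr (by omega))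
        rw [if_neg (by omega : ¬ rs + 1 ≥ max (rs + 1) rf), if_neg hc,
          (by omega : max (rs + 1) rf = rf), hlen]
        exact ih (pre ++ [rs + 1]) (rs + 1) rf count hws' h0 (by omega)
          (fun v hv => by rw [List.mem_append, List.mem_singleton, hmem v hv]; omega)
    · rw [if_neg hch, if_neg hch, if_neg (fun h => hch h.1)]
      have hm1 : rs + -1 = rs - 1 := by ring
      rw [hm1]
      have hws' : ws = (pre ++ [rs - 1]) ++ bWalk ")" rest (rs - 1) := by
        rw [hws, bWalk_cons, if_neg hch, hm1]; simp
      have hlen : (↑pre.length : Int) + 1 = ↑((pre ++ [rs - 1]).length) := by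
        simp
      rw [hlen]
      exact ih (pre ++ [rs - 1]) (rs - 1) rf count hws' h0 (by omega)
        (fun v hv => by rw [List.mem_append, List.mem_singleton, hmem v hv]; omega)

-- A's left loop = counting fold over the nonnegative prefix of the walk
theorem aLeftLoop_eq_takeWhile (cs : List String) : ∀ (s : Int) (d : PySem.Dict Int Int), 0 ≤ s →
    aLeftLoop cs s d
      = ((bWalk "(" cs s).takeWhile (fun v => decide (0 ≤ v))).foldl
          (fun d x => d.modify x 0 (· + 1)) d := by
  induction cs with
  | nil => intro s d _; simp [aLeftLoop, bWalk]
  | cons ch rest ih =>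
    intro s d hs
    rw [aLeftLoop_cons, bWalk_cons]
    by_cases hch : ch = "("
    · have h1 : (0 : Int) ≤ s + 1 := by omega
      rw [if_pos hch, if_pos hch, List.takeWhile_cons, if_pos (by simpa using h1),
        List.foldl_cons]
      exact ih (s + 1) _ h1
    · rw [if_neg hch, if_neg hch]
      by_cases hneg : s - 1 < 0
      · have hm1 : s + -1 = -1 := by omega
        rw [if_pos hneg, List.takeWhile_cons, hm1, if_neg (by simp)]
        rfl
      · have h1 : (0 : Int) ≤ s + -1 := by omega
        have hsub : s + -1 = s - 1 := by ring
        rw [if_neg hneg, List.takeWhile_cons, if_pos (by simpa using h1), List.foldl_cons, hsub]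
        exact ih (s - 1) _ (by omega)

-- B's truncation at the first -1 = takeWhile nonneg, on a ±1 walk from a nonneg start
theorem take_cut_eq_takeWhile (cs : List String) : ∀ (s : Int), 0 ≤ s →
    (bWalk "(" cs s).take
        (match PySem.List.index? (bWalk "(" cs s) (-1) with
         | some i => i
         | none => (bWalk "(" cs s).length)
      = (bWalk "(" cs s).takeWhile (fun v => decide (0 ≤ v)) := by
  induction cs with
  | nil => intro s _; simp [bWalk]
  | cons ch rest ih =>
    intro s hs
    rw [bWalk_cons]
    set s' := s + (if ch = "(" then 1 else -1) with hs'
    by_cases hpos : 0 ≤ s'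
    · have hne : s' ≠ -1 := by omega
      rw [PySem.List.index?_cons_of_ne _ hne]
      have hih := ih s' hpos
      rw [List.takeWhile_cons, if_pos (by simpa using hpos)]
      cases hidx : PySem.List.index? (bWalk "(" rest s') (-1) with
      | some i =>
        rw [hidx] at hih
        show List.take (i + 1) (s' :: bWalk "(" rest s') = _
        rw [List.take_succ_cons, hih]
      | none =>
        rw [hidx] at hih
        show List.take ((bWalk "(" rest s').length + 1) (s' :: bWalk "(" rest s') = _
        rw [List.take_succ_cons, hih]
    · have hm1 : s' = -1 := by
        have : s' = s + 1 ∨ s' = s - 1 := by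
          by_cases h : ch = "("
          · left; rw [hs', if_pos h]
          · right; rw [hs', if_neg h]; ring
        omega
      rw [hm1, PySem.List.index?_cons_self, List.takeWhile_cons, if_neg (by simp)]
      rfl

-- B's histogram = counting fold over the nonnegative prefix of the left walk
theorem lcB_char (left : List String) :
    PySem.Dict.counter (PySem.List.slice (bWalk "(" left 0) none
        (some ((bFirstReach (PySem.List.enumerate (bWalk "(" left 0) 0)
          PySem.Dict.empty).getD (-1) ((bWalk "(" left 0).length : Int))))
      = ((bWalk "(" left 0).takeWhile (fun v => decide (0 ≤ v))).foldl
          (fun d x => d.modify x 0 (· + 1)) PySem.Dict.empty := by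
  rw [PySem.Dict.getD_eq_get?_getD, firstReach_get?_empty, PySem.Dict.counter_eq_foldl,
    ← take_cut_eq_takeWhile left 0 (le_refl 0)]
  cases hidx : PySem.List.index? (bWalk "(" left 0) (-1) with
  | some i =>
    simp only [hidx, Option.pure_def, Option.bind_eq_bind, Option.bind_some,
      Option.map_some, Option.getD_some]
    rw [PySem.List.slice_to_natCast]
  | none =>
    simp only [hidx, Option.pure_def, Option.bind_eq_bind, Option.bind_none,
      Option.map_none, Option.getD_none]
    rw [PySem.List.slice_to_natCast]

-- ===== VERDICT (by name: the statement is the Claim_ definition above) =====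
theorem count_hightouch_spec : Claim_equal_count_hightouch := by
  intro left right _ hpre
  cases left with
  | nil => exact absurd rfl hpre
  | cons h t =>
    unfold Spec_count_hightouch count_hightouch count_hightouch_alt
    have hget : PySem.List.pyGet? (h :: t) 0 = some h := by
      simp [PySem.List.pyGet?, PySem.List.pyIdx?]
    rw [hget]
    dsimp only
    rw [lcB_char (h :: t)]
    by_cases hh : h = ")"
    · rw [if_pos hh]
      have hempty : (bWalk "(" (h :: t) 0).takeWhile (fun v => decide (0 ≤ v)) = [] := by
        subst hh
        rw [bWalk_cons, show ((0 : Int) + (if (")" : String) = "(" then 1 else -1)) = -1 from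
          by decide]
        rw [List.takeWhile_cons]
        norm_num
      rw [hempty, List.foldl_nil]
      exact (bLoop_empty _ _ 0).symm
    · rw [if_neg hh,
        ← aLeftLoop_eq_takeWhile (h :: t) 0 PySem.Dict.empty (le_refl 0)]
      have hrl := rightLoop_eq (bWalk ")" right 0) (aLeftLoop (h :: t) 0 PySem.Dict.empty)
        right [] 0 0 0 (by simp) (le_refl 0) (le_refl 0)
        (fun v hv => by simp; omega)
      simpa using hrl
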